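-- pv_equiv track=rewrite | github.com/Saidakhmad77/Udemy-Python | e2.py | count_captured_pieces
-- ===== SOURCE A (Python) =====
-- def count_captured_pieces(board):
--     n = len(board)
--     dx = [-2, -2, -1, -1, 1, 1, 2, 2]
--     dy = [-1, 1, -2, 2, -2, 2, -1, 1]
--
--     def is_valid(x, y):
--         return 0 <= x < n and 0 <= y < n
--
--     def can_capture(x, y):
--         for i in range(8):
--             nx, ny = x + dx[i], y + dy[i]
--             if is_valid(nx, ny) and board[nx][ny] == 'H':
--                 return True
--         return False
--
--     total_captured = 0
--     for i in range(n):
--         for j in range(n):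
--             if board[i][j] == 'X' and can_capture(i, j):
--                 total_captured += 1
--
--     return total_captured
-- ===== SOURCE B (Python) =====
-- def count_captured_pieces(board):
--     n = len(board)
--     moves = [(-2, -1), (-2, 1), (-1, -2), (-1, 2), (1, -2), (1, 2), (2, -1), (2, 1)]
--     attacked = set()
--     for i in range(n):
--         for j in range(n):
--             if board[i][j] == 'H':
--                 for dx, dy in moves:
--                     x, y = i + dx, j + dy
--                     if 0 <= x < n and 0 <= y < n:
--                         attacked.add((x, y))
--     return sum(1 for i in range(n) for j in range(n)
--                if board[i][j] == 'X' and (i, j) in attacked)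
-- ===== Notes on version B (the rewrite author's own statement) =====
-- stated objective: alternative
-- what changed: Replaces A's per-X inner scan of the 8 knight offsets (gather) by a scatter pass that inserts every in-bounds knight neighbor of each H into a set, then counts X cells whose coordinates are in that set, relying on the symmetry of the knight move.
import Mathlib
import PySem

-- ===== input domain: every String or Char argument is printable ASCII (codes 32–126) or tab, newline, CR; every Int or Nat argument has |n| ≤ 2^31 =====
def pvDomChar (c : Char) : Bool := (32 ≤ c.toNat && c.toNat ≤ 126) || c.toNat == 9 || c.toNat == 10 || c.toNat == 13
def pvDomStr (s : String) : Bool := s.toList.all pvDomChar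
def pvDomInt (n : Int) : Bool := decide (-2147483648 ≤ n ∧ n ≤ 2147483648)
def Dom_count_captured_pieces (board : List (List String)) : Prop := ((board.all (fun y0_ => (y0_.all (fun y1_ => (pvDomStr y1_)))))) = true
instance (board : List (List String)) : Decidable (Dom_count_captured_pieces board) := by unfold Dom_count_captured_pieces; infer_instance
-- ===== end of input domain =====

-- B scatters in-bounds knight neighbors of each 'H' into a set and then counts 'X' cells in it
-- (gather→scatter by knight-move symmetry); alternative decomposition, same asymptotic cost.


-- board[x][y] (both indices provably in range wherever either port's guard lets it matter)
def pvCell (board : List (List String)) (x y : Int) : String :=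
  PySem.List.pyGetD (PySem.List.pyGetD board x []) y ""

-- ===== PORT A =====
def pvDx : List Int := [-2, -2, -1, -1, 1, 1, 2, 2]
def pvDy : List Int := [-1, 1, -2, 2, -2, 2, -1, 1]

def pvIsValid (n x y : Int) : Bool := decide (0 ≤ x ∧ x < n ∧ 0 ≤ y ∧ y < n)

def pvCanCapture (board : List (List String)) (n x y : Int) : Bool :=
  (PySem.List.pyRange 0 8 1).any (fun i =>
    let nx := x + PySem.List.pyGetD pvDx i 0
    let ny := y + PySem.List.pyGetD pvDy i 0
    pvIsValid n nx ny && (pvCell board nx ny == "H"))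

def count_captured_pieces (board : List (List String)) : Int :=
  let n : Int := board.length
  (PySem.List.pyRange 0 n 1).foldl (fun tot i =>
    (PySem.List.pyRange 0 n 1).foldl (fun tot j =>
      if pvCell board i j == "X" && pvCanCapture board n i j then tot + 1 else tot) tot) 0

-- ===== PORT B =====
def pvMoves : List (Int × Int) :=
  [(-2, -1), (-2, 1), (-1, -2), (-1, 2), (1, -2), (1, 2), (2, -1), (2, 1)]

def pvAttacked (board : List (List String)) (n : Int) : PySem.Set (Int × Int) :=
  (PySem.List.pyRange 0 n 1).foldl (fun s i =>
    (PySem.List.pyRange 0 n 1).foldl (fun s j =>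
      if pvCell board i j == "H" then
        pvMoves.foldl (fun s m =>
          if decide (0 ≤ i + m.1 ∧ i + m.1 < n ∧ 0 ≤ j + m.2 ∧ j + m.2 < n) then
            PySem.Set.add s (i + m.1, j + m.2)
          else s) s
      else s) s) PySem.Set.empty

def count_captured_pieces_alt (board : List (List String)) : Int :=
  let n : Int := board.length
  let attacked := pvAttacked board n
  (PySem.List.pyRange 0 n 1).foldl (fun tot i =>
    (PySem.List.pyRange 0 n 1).foldl (fun tot j =>
      if pvCell board i j == "X" && PySem.Set.contains attacked (i, j) then tot + 1 else tot) tot) 0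

-- ===== PRECONDITION & SPEC =====
-- Pre_ excludes ragged boards with a row shorter than len(board): there Python A (and B) raises IndexError.
def Pre_count_captured_pieces (board : List (List String)) : Prop :=
  ∀ row ∈ board, board.length ≤ row.length
instance (board : List (List String)) : Decidable (Pre_count_captured_pieces board) := by
  unfold Pre_count_captured_pieces; infer_instance

def pvWitness_count_captured_pieces : List (List String) :=
  [["X", "H", "."], [".", ".", "."], [".", "X", "H"]]

def Spec_count_captured_pieces (board : List (List String)) (out : Int) : Prop := out = count_captured_pieces_alt board
instance (board : List (List String)) (out : Int) : Decidable (Spec_count_captured_pieces board out) := by unfold Spec_count_captured_pieces; infer_instance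

-- ===== CLAIM (what is proved, stated in full; the proofs are below) =====
def Claim_equal_count_captured_pieces : Prop := ∀ (board : List (List String)), Dom_count_captured_pieces board → Pre_count_captured_pieces board → Spec_count_captured_pieces board (count_captured_pieces board)

-- ===== LEMMAS AND PROOFS =====

-- membership in a fold that only ever (conditionally) inserts elements
theorem pv_mem_foldl {α β : Type} (p : β) (l : List α) (g : List β → α → List β) (Q : α → Prop)
    (h : ∀ s x, x ∈ l → (p ∈ g s x ↔ p ∈ s ∨ Q x)) :
    ∀ s, p ∈ l.foldl g s ↔ p ∈ s ∨ ∃ x ∈ l, Q x := by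
  induction l with
  | nil => simp
  | cons a t ih =>
    intro s
    rw [List.foldl_cons, ih (fun s x hx => h s x (List.mem_cons_of_mem a hx)) (g s a),
        h s a (List.mem_cons_self ..)]
    simp only [List.mem_cons]
    constructor
    · rintro ((hs | hq) | ⟨x, hx, hqx⟩)
      · exact Or.inl hs
      · exact Or.inr ⟨a, Or.inl rfl, hq⟩
      · exact Or.inr ⟨x, Or.inr hx, hqx⟩
    · rintro (hs | ⟨x, (rfl | hx), hqx⟩)
      · exact Or.inl (Or.inl hs)
      · exact Or.inl (Or.inr hqx)
      · exact Or.inr ⟨x, hx, hqx⟩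

theorem pv_mem_attacked (board : List (List String)) (n : Int) (p : Int × Int) :
    p ∈ pvAttacked board n ↔
      ∃ x ∈ PySem.List.pyRange 0 n 1, ∃ y ∈ PySem.List.pyRange 0 n 1,
        pvCell board x y = "H" ∧ ∃ m ∈ pvMoves,
          (0 ≤ x + m.1 ∧ x + m.1 < n ∧ 0 ≤ y + m.2 ∧ y + m.2 < n) ∧ p = (x + m.1, y + m.2) := by
  unfold pvAttacked
  rw [pv_mem_foldl p _ _
      (fun i => ∃ y ∈ PySem.List.pyRange 0 n 1, pvCell board i y = "H" ∧ ∃ m ∈ pvMoves,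
          (0 ≤ i + m.1 ∧ i + m.1 < n ∧ 0 ≤ y + m.2 ∧ y + m.2 < n) ∧ p = (i + m.1, y + m.2))
      (fun s i _ => by
        rw [pv_mem_foldl p _ _
            (fun j => pvCell board i j = "H" ∧ ∃ m ∈ pvMoves,
                (0 ≤ i + m.1 ∧ i + m.1 < n ∧ 0 ≤ j + m.2 ∧ j + m.2 < n) ∧ p = (i + m.1, j + m.2))
            (fun s j _ => by
              by_cases hH : pvCell board i j = "H"
              · simp only [hH, beq_self_eq_true, if_true]
                rw [pv_mem_foldl p _ _
                    (fun m => (0 ≤ i + m.1 ∧ i + m.1 < n ∧ 0 ≤ j + m.2 ∧ j + m.2 < n) ∧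
                      p = (i + m.1, j + m.2))
                    (fun s m _ => by
                      by_cases hb : 0 ≤ i + m.1 ∧ i + m.1 < n ∧ 0 ≤ j + m.2 ∧ j + m.2 < n
                      · simp [hb, PySem.Set.mem_add]
                      · simp [hb]) s]
                simp
              · simp [hH]) s]) (PySem.Set.empty)]
  simp [PySem.Set.empty]

theorem pv_neg_mem_moves : ∀ m ∈ pvMoves, (-m.1, -m.2) ∈ pvMoves := by decide

-- Bool equality of the two per-cell tests, for in-range (i, j)
theorem pv_pred_eq (board : List (List String)) (i j : Int)
    (hi : i ∈ PySem.List.pyRange 0 (board.length : Int) 1)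
    (hj : j ∈ PySem.List.pyRange 0 (board.length : Int) 1) :
    pvCanCapture board (board.length : Int) i j
      = PySem.Set.contains (pvAttacked board (board.length : Int)) (i, j) := by
  set n : Int := (board.length : Int) with hn
  rw [PySem.List.mem_pyRange_one] at hi hj
  have hA : pvCanCapture board n i j = true ↔
      ∃ m ∈ pvMoves, (0 ≤ i + m.1 ∧ i + m.1 < n ∧ 0 ≤ j + m.2 ∧ j + m.2 < n) ∧
        pvCell board (i + m.1) (j + m.2) = "H" := by
    have step : pvCanCapture board n i j = pvMoves.any (fun m =>
        pvIsValid n (i + m.1) (j + m.2) && (pvCell board (i + m.1) (j + m.2) == "H")) := by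
      unfold pvCanCapture
      rw [show PySem.List.pyRange 0 8 1 = [0, 1, 2, 3, 4, 5, 6, 7] from by decide]
      simp [pvDx, pvDy, pvMoves, PySem.List.pyGetD, PySem.List.pyIdx?, PySem.List.pyGet?]
    rw [step, List.any_eq_true]
    unfold pvIsValid
    simp [and_assoc]
  have hB : PySem.Set.contains (pvAttacked board n) (i, j) = true ↔
      ∃ m ∈ pvMoves, (0 ≤ i + m.1 ∧ i + m.1 < n ∧ 0 ≤ j + m.2 ∧ j + m.2 < n) ∧
        pvCell board (i + m.1) (j + m.2) = "H" := by
    rw [PySem.Set.contains_iff, pv_mem_attacked]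
    constructor
    · rintro ⟨x, hx, y, hy, hH, m, hm, hb, hp⟩
      rw [PySem.List.mem_pyRange_one] at hx hy
      rw [Prod.mk.injEq] at hp
      obtain ⟨h1, h2⟩ := hp
      refine ⟨(-m.1, -m.2), pv_neg_mem_moves m hm, ?_, ?_⟩
      · simp only at h1 h2 ⊢; omega
      · have ex : i + (-m.1, -m.2).1 = x := by simp only at h1 ⊢; omega
        have ey : j + (-m.1, -m.2).2 = y := by simp only at h2 ⊢; omega
        rw [ex, ey]; exact hH
    · rintro ⟨m, hm, hb, hH⟩
      refine ⟨i + m.1, ?_, j + m.2, ?_, hH, (-m.1, -m.2), pv_neg_mem_moves m hm, ?_, ?_⟩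
      · rw [PySem.List.mem_pyRange_one]; exact ⟨hb.1, hb.2.1⟩
      · rw [PySem.List.mem_pyRange_one]; exact ⟨hb.2.2.1, hb.2.2.2⟩
      · simp only; omega
      · simp only [Prod.mk.injEq]; omega
  have key : (pvCanCapture board n i j = true) ↔
      (PySem.Set.contains (pvAttacked board n) (i, j) = true) := hA.trans hB.symm
  cases hc : pvCanCapture board n i j <;>
    cases hd : PySem.Set.contains (pvAttacked board n) (i, j) <;> simp_all

-- ===== VERDICT (by name: the statement is the Claim_ definition above) =====
theorem count_captured_pieces_spec : Claim_equal_count_captured_pieces := by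
  intro board _ _
  unfold Spec_count_captured_pieces count_captured_pieces count_captured_pieces_alt
  simp only
  refine PySem.List.foldl_congr_mem _ _ _ _ (fun tot i hi => ?_)
  refine PySem.List.foldl_congr_mem _ _ _ _ (fun tot' j hj => ?_)
  rw [pv_pred_eq board i j hi hj]
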